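-- pv_equiv track=rewrite | github.com/KamyarBanz/TimeEvolutionQuantComputing | GroupProject/time_evolution/suzuki_trotter_algorithm.py | bond_layers
-- ===== SOURCE A (Python) =====
-- def bond_layers(L: int):
--     """
--     Returns two lists of nearest-neighbour bonds (i,j):
--       even layer: (0,1),(2,3),...
--       odd  layer: (1,2),(3,4),...
--     """
--     if L < 2:
--         raise ValueError("L must be >= 2")
--     if L % 2 != 0:
--         raise ValueError("Periodic 2-layer bond split requires even L")
--
--     even = [(i, i+1) for i in range(0, L-1, 2)]
--     odd  = [(i, i+1) for i in range(1, L-1, 2)]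
--
--     # wrap bond (L-1,0) exists
--     if (L - 1) % 2 == 0:
--         even.append((L-1, 0))
--     else:
--         odd.append((L-1, 0))
--
--     return even, odd
-- ===== SOURCE B (Python) =====
-- def bond_layers(L: int):
--     """
--     Returns two lists of nearest-neighbour bonds (i,j):
--       even layer: (0,1),(2,3),...
--       odd  layer: (1,2),(3,4),...
--     """
--     if L < 2:
--         raise ValueError("L must be >= 2")
--     if L % 2 != 0:
--         raise ValueError("Periodic 2-layer bond split requires even L")
--
--     even, odd = [], []
--     for i in range(L):
--         bond = (i, (i + 1) % L)
--         if i % 2 == 0: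
--             even.append(bond)
--         else:
--             odd.append(bond)
--     return even, odd
-- ===== Notes on version B (the rewrite author's own statement) =====
-- stated objective: simpler
-- what changed: Replaces the two stride-2 range comprehensions plus the special-cased wrap append with a single pass over range(L) that forms each periodic bond (i,(i+1)%L) and routes it to even/odd by parity, so the wrap bond needs no special case.
import Mathlib
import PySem

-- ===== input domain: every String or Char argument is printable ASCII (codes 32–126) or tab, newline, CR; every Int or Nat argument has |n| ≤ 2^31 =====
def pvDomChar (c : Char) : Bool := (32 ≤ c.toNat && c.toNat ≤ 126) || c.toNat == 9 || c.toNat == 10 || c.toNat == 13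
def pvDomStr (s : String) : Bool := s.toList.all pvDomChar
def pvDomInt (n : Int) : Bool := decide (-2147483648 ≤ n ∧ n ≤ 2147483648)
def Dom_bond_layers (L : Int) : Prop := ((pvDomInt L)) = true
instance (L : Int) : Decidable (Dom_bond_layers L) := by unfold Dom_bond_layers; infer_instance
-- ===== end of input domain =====

-- B replaces the two stride-2 comprehensions and the special-cased wrap append by one
-- modular pass over range(L), routing each bond (i,(i+1)%L) to even/odd by parity (simpler).

-- ===== PORT A =====
def bond_layers (L : Int) : (List (Int × Int)) × (List (Int × Int)) :=
  let even := (PySem.List.pyRange 0 (L - 1) 2).map (fun i => (i, i + 1))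
  let odd  := (PySem.List.pyRange 1 (L - 1) 2).map (fun i => (i, i + 1))
  if PySem.Int.mod (L - 1) 2 = 0 then (even ++ [(L - 1, 0)], odd)
  else (even, odd ++ [(L - 1, 0)])

-- ===== PORT B =====
def bond_layers_alt (L : Int) : (List (Int × Int)) × (List (Int × Int)) :=
  (PySem.List.pyRange 0 L 1).foldl
    (fun eo i =>
      if PySem.Int.mod i 2 = 0 then (eo.1 ++ [(i, PySem.Int.mod (i + 1) L)], eo.2)
      else (eo.1, eo.2 ++ [(i, PySem.Int.mod (i + 1) L)]))
    ([], [])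

-- ===== PRECONDITION & SPEC =====
-- A raises ValueError when L is below two or when L is odd; Pre_ admits exactly the inputs where A returns.
def Pre_bond_layers (L : Int) : Prop := 2 ≤ L ∧ PySem.Int.mod L 2 = 0
instance (L : Int) : Decidable (Pre_bond_layers L) := by unfold Pre_bond_layers; infer_instance
def pvWitness_bond_layers : Int := (6)
def Spec_bond_layers (L : Int) (out : (List (Int × Int)) × (List (Int × Int))) : Prop := out = bond_layers_alt L
instance (L : Int) (out : (List (Int × Int)) × (List (Int × Int))) : Decidable (Spec_bond_layers L out) := by unfold Spec_bond_layers; infer_instance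

-- ===== CLAIM (what is proved, stated in full; the proofs are below) =====
def Claim_equal_bond_layers : Prop := ∀ (L : Int), Dom_bond_layers L → Pre_bond_layers L → Spec_bond_layers L (bond_layers L)

-- ===== LEMMAS AND PROOFS =====

-- mod facts specific to the chain bonds
lemma pv_mod_eq_self {a b : Int} (h0 : 0 ≤ a) (h1 : a < b) : PySem.Int.mod a b = a := by
  rw [PySem.Int.mod_eq_emod_of_pos (lt_of_le_of_lt h0 h1)]
  exact Int.emod_eq_of_lt h0 h1

lemma pv_mod_self {b : Int} (hb : 0 < b) : PySem.Int.mod b b = 0 := by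
  rw [PySem.Int.mod_eq_emod_of_pos hb]; simp

-- the parity filters of [0, …, 2k-1] (as Int) are the even resp. odd entries, in order
lemma pv_filter_even (k : Nat) :
    (((List.range (2 * k)).map (fun (j : Nat) => (j : Int))).filter
      (fun i => decide (PySem.Int.mod i 2 = 0)))
      = (List.range k).map (fun (j : Nat) => (2 * (j : Int))) := by
  induction k with
  | zero => simp
  | succ k ih =>
    have h2 : 2 * (k + 1) = 2 * k + 1 + 1 := by ring
    rw [h2, List.range_succ, List.range_succ, List.range_succ]
    simp only [List.map_append, List.filter_append, ih, List.map_cons, List.map_nil,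
      List.filter_cons, List.filter_nil]
    simp

lemma pv_filter_odd (k : Nat) :
    (((List.range (2 * k)).map (fun (j : Nat) => (j : Int))).filter
      (fun i => decide (¬ PySem.Int.mod i 2 = 0)))
      = (List.range k).map (fun (j : Nat) => (2 * (j : Int) + 1)) := by
  induction k with
  | zero => simp
  | succ k ih =>
    have h2 : 2 * (k + 1) = 2 * k + 1 + 1 := by ring
    rw [h2, List.range_succ, List.range_succ, List.range_succ]
    simp only [List.map_append, List.filter_append, ih, List.map_cons, List.map_nil,
      List.filter_cons, List.filter_nil]
    simp

theorem bond_layers_spec : Claim_equal_bond_layers := by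
  intro L _ hpre
  obtain ⟨hL2, hmod⟩ := hpre
  -- L = 2 * k with 1 ≤ k
  have hdvd : (2 : Int) ∣ L := (PySem.Int.mod_eq_zero_iff_dvd L 2).mp hmod
  obtain ⟨kz, hkz⟩ := hdvd
  obtain ⟨k, hk⟩ : ∃ k : Nat, L = 2 * (k : Int) := ⟨kz.toNat, by omega⟩
  have hk1 : 1 ≤ k := by omega
  subst hk
  unfold Spec_bond_layers bond_layers bond_layers_alt
  -- B side: split the paired fold into two independent folds, one per component
  rw [show (fun (eo : List (Int × Int) × List (Int × Int)) (i : Int) =>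
      if PySem.Int.mod i 2 = 0 then (eo.1 ++ [(i, PySem.Int.mod (i + 1) (2 * (k : Int)))], eo.2)
      else (eo.1, eo.2 ++ [(i, PySem.Int.mod (i + 1) (2 * (k : Int)))]))
      = (fun (eo : List (Int × Int) × List (Int × Int)) (i : Int) =>
        ((if (decide (PySem.Int.mod i 2 = 0)) = true
          then eo.1 ++ [(i, PySem.Int.mod (i + 1) (2 * (k : Int)))] else eo.1),
         (if (decide (¬ PySem.Int.mod i 2 = 0)) = true
          then eo.2 ++ [(i, PySem.Int.mod (i + 1) (2 * (k : Int)))] else eo.2)))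
      from by
        funext eo i
        by_cases h : PySem.Int.mod i 2 = 0
        · rw [if_pos h, if_pos (decide_eq_true h), if_neg (by rw [decide_eq_false (not_not_intro h)]; exact Bool.false_ne_true)]
        · rw [if_neg h, if_neg (by rw [decide_eq_false h]; exact Bool.false_ne_true), if_pos (decide_eq_true h)]]
  rw [PySem.List.foldl_prod_mk
    (fun e (i : Int) => if (decide (PySem.Int.mod i 2 = 0)) = true
      then e ++ [(i, PySem.Int.mod (i + 1) (2 * (k : Int)))] else e)
    (fun o (i : Int) => if (decide (¬ PySem.Int.mod i 2 = 0)) = true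
      then o ++ [(i, PySem.Int.mod (i + 1) (2 * (k : Int)))] else o)]
  rw [PySem.List.foldl_append_if (fun i => decide (PySem.Int.mod i 2 = 0))
    (fun i => (i, PySem.Int.mod (i + 1) (2 * (k : Int))))]
  rw [PySem.List.foldl_append_if (fun i => decide (¬ PySem.Int.mod i 2 = 0))
    (fun i => (i, PySem.Int.mod (i + 1) (2 * (k : Int))))]
  have hrw : PySem.List.pyRange 0 (2 * (k : Int)) 1
      = (List.range (2 * k)).map (fun (j : Nat) => (j : Int)) := by
    rw [show (2 * (k : Int)) = ((2 * k : Nat) : Int) from by push_cast; ring]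
    exact PySem.List.pyRange_zero_nat (2 * k)
  rw [hrw, pv_filter_even k, pv_filter_odd k]
  -- B even component: no bond wraps, (i+1) % L = i+1
  have heB : (List.map (fun (j : Nat) => (2 * (j : Int))) (List.range k)).map
        (fun i => (i, PySem.Int.mod (i + 1) (2 * (k : Int))))
      = (List.range k).map (fun (j : Nat) => ((2 * (j : Int)), (2 * (j : Int) + 1))) := by
    rw [List.map_map]
    refine List.map_congr_left ?_
    intro j hj
    have hj' : j < k := List.mem_range.mp hj
    have hm : PySem.Int.mod (2 * (j : Int) + 1) (2 * (k : Int)) = 2 * (j : Int) + 1 :=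
      pv_mod_eq_self (by positivity) (by omega)
    simp [Function.comp, hm]
  -- B odd component: last bond (i = 2k-1) wraps to 0, the rest do not
  have hoB : (List.map (fun (j : Nat) => (2 * (j : Int) + 1)) (List.range k)).map
        (fun i => (i, PySem.Int.mod (i + 1) (2 * (k : Int))))
      = ((List.range (k - 1)).map (fun (j : Nat) => ((2 * (j : Int) + 1), (2 * (j : Int) + 2))))
        ++ [((2 * (k : Int) - 1), 0)] := by
    rw [List.map_map]
    rw [show k = (k - 1) + 1 from by omega, List.range_succ, List.map_append]
    congr 1
    · refine List.map_congr_left ?_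
      intro j hj
      have hj' : j < k - 1 := List.mem_range.mp hj
      have hm : PySem.Int.mod (2 * (j : Int) + 1 + 1) (2 * (((k - 1 : Nat) + 1 : Nat) : Int))
          = 2 * (j : Int) + 2 :=
        pv_mod_eq_self (by positivity) (by push_cast; omega)
      simp only [Function.comp_apply, hm]
    · have hm : PySem.Int.mod (2 * (((k - 1 : Nat)) : Int) + 1 + 1)
          (2 * (((k - 1 : Nat) + 1 : Nat) : Int)) = 0 := by
        rw [show (2 * (((k - 1 : Nat)) : Int) + 1 + 1) = 2 * (((k - 1 : Nat) + 1 : Nat) : Int)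
          from by push_cast; ring]
        exact pv_mod_self (by positivity)
      simp only [List.map_cons, List.map_nil, Function.comp_apply, hm]
      have : (2 * (((k - 1 : Nat)) : Int) + 1) = 2 * (((k - 1 : Nat) + 1 : Nat) : Int) - 1 := by
        push_cast; ring
      rw [this]
  rw [heB, hoB]
  -- A side: the two stride-2 ranges, and the wrap bond goes to the odd layer (2k-1 is odd)
  have hA_even : PySem.List.pyRange 0 (2 * (k : Int) - 1) 2
      = (List.range k).map (fun (j : Nat) => (2 * (j : Int))) := by
    rw [PySem.List.pyRange_of_pos 0 (2 * (k : Int) - 1) (by norm_num)]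
    rw [if_pos (by omega), show ((2 * (k : Int) - 1 - 0 + 2 - 1) / 2).toNat = k from by omega]
    refine List.map_congr_left ?_
    intro j _; ring
  have hA_odd : PySem.List.pyRange 1 (2 * (k : Int) - 1) 2
      = (List.range (k - 1)).map (fun (j : Nat) => (2 * (j : Int) + 1)) := by
    rw [PySem.List.pyRange_of_pos 1 (2 * (k : Int) - 1) (by norm_num)]
    by_cases hk2 : 2 ≤ k
    · have hc : ((2 * (k : Int) - 1 - 1 + 2 - 1) / 2).toNat = k - 1 := by omega
      rw [if_pos (by omega), hc]
      refine List.map_congr_left ?_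
      intro j _; ring
    · have hk1' : k = 1 := by omega
      subst hk1'
      rw [if_neg (by norm_num)]
      simp
  have hmodA : PySem.Int.mod (2 * (k : Int) - 1) 2 ≠ 0 := by
    rw [PySem.Int.mod_eq_emod_of_pos (by norm_num)]; omega
  rw [if_neg hmodA, hA_even, hA_odd]
  simp only [List.map_map]
  refine Prod.ext ?_ ?_
  · refine (List.map_congr_left ?_)
    intro j _
    simp [Function.comp]
  · simp only [List.map_append]
    have hm2 : List.map ((fun (i : Int) => (i, i + 1)) ∘ fun (j : Nat) => 2 * (j : Int) + 1)
        (List.range (k - 1))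
        = List.map (fun (j : Nat) => ((2 * (j : Int) + 1), (2 * (j : Int) + 2))) (List.range (k - 1)) := by
      refine List.map_congr_left ?_
      intro j _
      simp only [Function.comp_apply]
      ring_nf
    rw [hm2, List.nil_append]
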